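-- pv_equiv track=rewrite | github.com/yaugear/ips_projects | notebooks/scripts/task1_get_contexts.py | get_5grams_of
-- ===== SOURCE A (Python) =====
-- def get_5grams_of(sentences, disamed, words):
--     result = []
--     for sentence in sentences:
--         for i, (word, morph) in enumerate(sentence):
--             if not words or (words and word in words):
--                 result.append((tuple(sentence[i-2]) if i-2 >= 0 else (None, None),
--                                tuple(sentence[i-1]) if i-1 >= 0 else (None, None),
--                                (word, morph),
--                                tuple(sentence[i+1]) if i+1 < len(sentence) else (None, None),
--                                tuple(sentence[i+2]) if i+2 < len(sentence) else (None, None)))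
--
--     return result
-- ===== SOURCE B (Python) =====
-- def get_5grams_of(sentences, disamed, words):
--     result = []
--     for sentence in sentences:
--         padded = [(None, None), (None, None)] + list(sentence) + [(None, None), (None, None)]
--         result.extend(tuple(tuple(e) for e in padded[i:i + 5])
--                       for i, (word, _) in enumerate(sentence)
--                       if not words or word in words)
--     return result
-- ===== Notes on version B (the rewrite author's own statement) =====
-- stated objective: simpler
-- what changed: Replaces the four conditional index bounds checks per match with a sentinel-padded copy of the sentence and a plain 5-slice, and builds the grams with a comprehension instead of an explicit append loop.
import Mathlib
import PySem

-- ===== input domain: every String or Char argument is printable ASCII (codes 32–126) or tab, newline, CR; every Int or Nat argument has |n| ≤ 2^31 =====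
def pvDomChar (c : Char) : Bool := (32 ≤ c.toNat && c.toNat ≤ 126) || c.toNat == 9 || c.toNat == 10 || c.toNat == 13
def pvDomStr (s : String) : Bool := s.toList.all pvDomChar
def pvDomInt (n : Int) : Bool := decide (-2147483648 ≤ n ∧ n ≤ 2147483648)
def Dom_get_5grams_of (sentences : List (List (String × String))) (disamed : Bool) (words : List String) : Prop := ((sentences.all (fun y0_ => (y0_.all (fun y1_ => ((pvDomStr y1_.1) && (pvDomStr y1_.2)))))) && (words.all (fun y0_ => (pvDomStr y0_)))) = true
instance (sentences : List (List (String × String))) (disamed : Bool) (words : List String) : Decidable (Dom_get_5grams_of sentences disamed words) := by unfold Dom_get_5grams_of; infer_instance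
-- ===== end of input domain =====

-- B replaces A's four conditional bounds checks with a sentinel-padded sentence and a plain 5-slice (objective: simpler).

-- shared token conversion: a Python pair (w, m) as an output token [some w, some m]
def pvTok (p : String × String) : List (Option String) := [p.1, p.2].map some

-- (None, None) as an output token
def pvNN : List (Option String) := [none, none]

-- ===== PORT A =====
-- literal transliteration of A: for each sentence, enumerate; on a match append the 5-tuple with
-- four conditional bounds checks.  sentence[i-2] etc. are always in range when the guard holds,
-- so pyGetD with a junk default is exact there.
def get_5grams_of (sentences : List (List (String × String))) (disamed : Bool) (words : List String) : List (List (List (Option String))) :=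
  sentences.foldl (fun result sentence =>
    (PySem.List.enumerate sentence).foldl (fun res iwm =>
      if words.isEmpty || (!words.isEmpty && words.contains iwm.2.1) then
        res ++ [[ if iwm.1 - 2 ≥ 0 then pvTok (PySem.List.pyGetD sentence (iwm.1 - 2) ("", "")) else pvNN,
                  if iwm.1 - 1 ≥ 0 then pvTok (PySem.List.pyGetD sentence (iwm.1 - 1) ("", "")) else pvNN,
                  [some iwm.2.1, some iwm.2.2],
                  if iwm.1 + 1 < (sentence.length : Int) then pvTok (PySem.List.pyGetD sentence (iwm.1 + 1) ("", "")) else pvNN,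
                  if iwm.1 + 2 < (sentence.length : Int) then pvTok (PySem.List.pyGetD sentence (iwm.1 + 2) ("", "")) else pvNN ]]
      else res) result) []

-- ===== PORT B =====
-- transliteration of Source B: padded buffer of optional-string pairs ((None,None) sentinels; the
-- Option wrapping of real tokens is the type conversion), 5-slice per match, tokens tupled at
-- slice time (tuple(tuple(e) for e in padded[i:i+5])), grams collected by a comprehension.
def get_5grams_of_alt (sentences : List (List (String × String))) (disamed : Bool) (words : List String) : List (List (List (Option String))) :=
  sentences.foldl (fun result sentence =>
    let padded : List (Option String × Option String) :=
      (none, none) :: (none, none) :: (sentence.map (fun p => (some p.1, some p.2)) ++ [(none, none), (none, none)])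
    result ++ (PySem.List.enumerate sentence).filterMap (fun iwm =>
      if words.isEmpty || words.contains iwm.2.1 then
        some ((PySem.List.slice padded (some iwm.1) (some (iwm.1 + 5))).map (fun e => [e.1, e.2]))
      else none)) []

-- ===== PRECONDITION & SPEC =====
def Spec_get_5grams_of (sentences : List (List (String × String))) (disamed : Bool) (words : List String) (out : List (List (List (Option String)))) : Prop := out = get_5grams_of_alt sentences disamed words
instance (sentences : List (List (String × String))) (disamed : Bool) (words : List String) (out : List (List (List (Option String)))) : Decidable (Spec_get_5grams_of sentences disamed words out) := by unfold Spec_get_5grams_of; infer_instance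

-- ===== CLAIM (what is proved, stated in full; the proofs are below) =====
def Claim_equal_get_5grams_of : Prop := ∀ (sentences : List (List (String × String))) (disamed : Bool) (words : List String), Dom_get_5grams_of sentences disamed words → Spec_get_5grams_of sentences disamed words (get_5grams_of sentences disamed words)

-- ===== LEMMAS AND PROOFS =====

-- the common match test
def pvCond (words : List String) (iwm : Int × String × String) : Bool :=
  words.isEmpty || words.contains iwm.2.1

-- A's match test reduces to the common one
lemma pvCond_A (words : List String) (iwm : Int × String × String) :
    (words.isEmpty || (!words.isEmpty && words.contains iwm.2.1)) = pvCond words iwm := by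
  unfold pvCond
  cases h : words.isEmpty <;> simp

-- take 5 after drop, written out elementwise
lemma take5_drop {α : Type} (d : α) : ∀ (i : Nat) (l : List α), i + 5 ≤ l.length →
    (l.drop i).take 5 = [l.getD i d, l.getD (i+1) d, l.getD (i+2) d, l.getD (i+3) d, l.getD (i+4) d] := by
  intro i
  induction i with
  | zero =>
    intro l h
    match l, h with
    | a :: b :: c :: d' :: e :: rest, _ => simp
  | succ i ih =>
    intro l h
    match l, h with
    | x :: t, h =>
      have := ih t (by simpa using h)
      simpa using this

-- the padded buffer and its elementwise description
def pvPad (s : List (String × String)) : List (Option String × Option String) :=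
  (none, none) :: (none, none) :: (s.map (fun p => (some p.1, some p.2)) ++ [(none, none), (none, none)])

lemma pvPad_getD_in (s : List (String × String)) (k : Nat) (h2 : 2 ≤ k) (hlt : k - 2 < s.length) :
    (pvPad s).getD k (none, none) = (some (s.getD (k-2) ("", "")).1, some (s.getD (k-2) ("", "")).2) := by
  obtain ⟨j, rfl⟩ : ∃ j, k = j + 2 := ⟨k - 2, by omega⟩
  have hj : j < s.length := by omega
  simp only [pvPad, List.getD_cons_succ]
  rw [List.getD_eq_getElem?_getD, List.getElem?_append_left (by simpa using hj)]
  simp [List.getElem?_eq_getElem hj, List.getD_eq_getElem?_getD]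

lemma pvPad_getD_out (s : List (String × String)) (k : Nat) (h : k < 2 ∨ s.length ≤ k - 2) :
    (pvPad s).getD k (none, none) = (none, none) := by
  match k, h with
  | 0, _ => rfl
  | 1, _ => rfl
  | (j+2), h =>
    have hj : s.length ≤ j := by omega
    simp only [pvPad, List.getD_cons_succ]
    rw [List.getD_eq_getElem?_getD, List.getElem?_append_right (by simpa using hj)]
    match hd : j - s.length with
    | 0 => simp [hd]
    | 1 => simp [hd]
    | (m+2) => simp [hd]

-- the per-match 5-gram: A's conditional construction equals B's padded slice
lemma gram_eq (s : List (String × String)) (k : Nat) (h : k < s.length) :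
    [ if (k : Int) - 2 ≥ 0 then pvTok (PySem.List.pyGetD s ((k : Int) - 2) ("", "")) else pvNN,
      if (k : Int) - 1 ≥ 0 then pvTok (PySem.List.pyGetD s ((k : Int) - 1) ("", "")) else pvNN,
      [some (s[k]'h).1, some (s[k]'h).2],
      if (k : Int) + 1 < (s.length : Int) then pvTok (PySem.List.pyGetD s ((k : Int) + 1) ("", "")) else pvNN,
      if (k : Int) + 2 < (s.length : Int) then pvTok (PySem.List.pyGetD s ((k : Int) + 2) ("", "")) else pvNN ]
    = (PySem.List.slice (pvPad s) (some (k : Int)) (some ((k : Int) + 5))).map (fun e => [e.1, e.2]) := by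
  have h5 : (5 : Int) = ((5 : Nat) : Int) := rfl
  rw [h5, PySem.List.slice_natCast_add]
  rw [take5_drop (none, none) k (pvPad s) (by unfold pvPad; simp; omega)]
  simp only [List.map_cons, List.map_nil]
  congr 1
  · -- position k : sentence index k-2
    by_cases h2 : 2 ≤ k
    · rw [pvPad_getD_in s k h2 (by omega)]
      have : (k : Int) - 2 = ((k - 2 : Nat) : Int) := by omega
      rw [if_pos (by omega), this, PySem.List.pyGetD_natCast]
      simp [pvTok]
    · rw [pvPad_getD_out s k (Or.inl (by omega)), if_neg (by omega)]
      rfl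
  congr 1
  · -- position k+1 : sentence index k-1
    by_cases h2 : 1 ≤ k
    · rw [pvPad_getD_in s (k+1) (by omega) (by omega)]
      have he : k + 1 - 2 = k - 1 := by omega
      have : (k : Int) - 1 = ((k - 1 : Nat) : Int) := by omega
      rw [he, if_pos (by omega), this, PySem.List.pyGetD_natCast]
      simp [pvTok]
    · rw [pvPad_getD_out s (k+1) (Or.inl (by omega)), if_neg (by omega)]
      rfl
  congr 1
  · -- center position
    rw [pvPad_getD_in s (k+2) (by omega) (by simpa using h)]
    simp [List.getD_eq_getElem?_getD, List.getElem?_eq_getElem h]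
  congr 1
  · -- position k+3 : sentence index k+1
    by_cases h2 : k + 1 < s.length
    · rw [pvPad_getD_in s (k+3) (by omega) (by omega)]
      have harith : (k : Int) + 1 = ((k + 1 : Nat) : Int) := by omega
      rw [if_pos (by omega), harith, PySem.List.pyGetD_natCast]
      simp [pvTok]
    · rw [pvPad_getD_out s (k+3) (Or.inr (by omega)), if_neg (by omega)]
      rfl
  congr 1
  · -- position k+4 : sentence index k+2
    by_cases h2 : k + 2 < s.length
    · rw [pvPad_getD_in s (k+4) (by omega) (by omega)]
      have harith : (k : Int) + 2 = ((k + 2 : Nat) : Int) := by omega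
      rw [if_pos (by omega), harith, PySem.List.pyGetD_natCast]
      simp [pvTok]
    · rw [pvPad_getD_out s (k+4) (Or.inr (by omega)), if_neg (by omega)]
      rfl

-- filterMap of a guarded some is map-after-filter
lemma filterMap_guard {α β : Type} (p : α → Bool) (f : α → β) :
    ∀ (l : List α), l.filterMap (fun x => if p x then some (f x) else none) = (l.filter p).map f := by
  intro l
  induction l with
  | nil => rfl
  | cons x t ih => by_cases h : p x <;> simp [h, ih]

-- both inner loops compute res ++ the same per-sentence gram list
lemma inner_eq (words : List String) (s : List (String × String)) (res : List (List (List (Option String)))) :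
    (PySem.List.enumerate s).foldl (fun r iwm =>
      if words.isEmpty || (!words.isEmpty && words.contains iwm.2.1) then
        r ++ [[ if iwm.1 - 2 ≥ 0 then pvTok (PySem.List.pyGetD s (iwm.1 - 2) ("", "")) else pvNN,
                if iwm.1 - 1 ≥ 0 then pvTok (PySem.List.pyGetD s (iwm.1 - 1) ("", "")) else pvNN,
                [some iwm.2.1, some iwm.2.2],
                if iwm.1 + 1 < (s.length : Int) then pvTok (PySem.List.pyGetD s (iwm.1 + 1) ("", "")) else pvNN,
                if iwm.1 + 2 < (s.length : Int) then pvTok (PySem.List.pyGetD s (iwm.1 + 2) ("", "")) else pvNN ]]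
      else r) res
    = res ++ (PySem.List.enumerate s).filterMap (fun iwm =>
        if words.isEmpty || words.contains iwm.2.1 then
          some ((PySem.List.slice (pvPad s) (some iwm.1) (some (iwm.1 + 5))).map (fun e => [e.1, e.2]))
        else none) := by
  simp only [pvCond_A]
  rw [PySem.List.foldl_append_if (pvCond words) _ _ res]
  rw [filterMap_guard (fun iwm => words.isEmpty || words.contains iwm.2.1) _ (PySem.List.enumerate s)]
  have hc : (PySem.List.enumerate s).filter (pvCond words)
      = (PySem.List.enumerate s).filter (fun iwm => words.isEmpty || words.contains iwm.2.1) := rfl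
  rw [← hc]
  congr 1
  apply List.map_congr_left
  intro iwm hmem
  rw [List.mem_filter] at hmem
  obtain ⟨k, hk, hp⟩ := (PySem.List.mem_enumerate_iff _ _ _).1 hmem.1
  subst hp
  simpa using gram_eq s k hk

-- ===== VERDICT (by name: the statement is the Claim_ definition above) =====
theorem get_5grams_of_spec : Claim_equal_get_5grams_of := by
  intro sentences disamed words hdom
  clear hdom
  unfold Spec_get_5grams_of get_5grams_of get_5grams_of_alt
  induction sentences using List.reverseRecOn with
  | nil => rfl
  | append_singleton init s ih =>
    simp only [List.foldl_append, List.foldl_cons, List.foldl_nil]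
    rw [ih, inner_eq]
    rfl
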